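-- pv_equiv track=rewrite | github.com/rHermes/adventofcode | 2020/14/y2020_d14_p02.py | narrow_hashe
-- ===== SOURCE A (Python) =====
-- import collections
--
-- def collides(old, new):
--     # First we check that they collide
--     for x, y in zip(old, new):
--         if x != y:
--             # if they don't match and they have no conflict we add
--             if x != "X" and y != "X":
--                 return False
--
--     return True
--
-- def narrow_hashe(old, new):
--     good = []
--     cons = collections.deque([new])
--     while cons:
--         cur = cons.popleft()
--         if not collides(old, cur):
--             good.append(cur)
--             continue
--
--         # We colldie so we implement something
--         # the first X we have that can be toggled
--         # we add to the pile
--         for i in range(len(new)):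
--             if new[i] == 'X' and old[i] != 'X':
--                 zz = new.copy()
--                 if old[i] == '1':
--                     zz[i] = '0'
--                 else:
--                     zz[i] = '1'
--
--                 cons.append(zz)
--                 # good.append(zz)
--                 #break
--
--     return good
-- ===== SOURCE B (Python) =====
-- def narrow_hashe(old, new):
--     # If old and new already have a hard conflict (differing non-X bits in the
--     # zipped region), the region is disjoint: keep it whole.
--     if any(x != y and x != "X" and y != "X" for x, y in zip(old, new)):
--         return [new]
--     # Otherwise they overlap.  Each copy of `new` with one floating bit pinned
--     # to the opposite of old's bit conflicts with old at that bit, so it can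
--     # never overlap again: emit the toggled copies directly, no queue, no
--     # per-copy collision re-check.
--     return [new[:i] + ["0" if old[i] == "1" else "1"] + new[i + 1:]
--             for i in range(len(new)) if new[i] == "X" and old[i] != "X"]
-- ===== Notes on version B (the rewrite author's own statement) =====
-- stated objective: simpler
-- what changed: A runs a BFS work-queue (deque) that re-checks collides() on every generated child; B checks the collision once and, since a child with one floating bit pinned opposite to old provably never collides again, emits the toggled copies directly in a single comprehension with no queue and no re-checks.
import Mathlib
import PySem

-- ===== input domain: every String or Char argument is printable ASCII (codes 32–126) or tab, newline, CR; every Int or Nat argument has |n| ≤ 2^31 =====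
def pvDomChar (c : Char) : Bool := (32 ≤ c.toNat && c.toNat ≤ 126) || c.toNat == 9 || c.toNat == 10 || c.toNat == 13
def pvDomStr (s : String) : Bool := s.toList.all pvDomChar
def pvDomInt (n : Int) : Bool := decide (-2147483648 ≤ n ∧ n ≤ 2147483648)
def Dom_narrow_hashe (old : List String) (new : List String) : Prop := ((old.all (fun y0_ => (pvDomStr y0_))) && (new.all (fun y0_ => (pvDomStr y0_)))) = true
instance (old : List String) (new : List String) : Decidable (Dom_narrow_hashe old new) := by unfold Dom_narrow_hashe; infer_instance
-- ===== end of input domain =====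

-- B replaces A's BFS work-queue (which re-runs collides() on every generated child)
-- by a single collision check followed by one direct pass emitting the toggled copies
-- (simpler: no queue, no per-child re-check; same asymptotic cost).

-- ===== PORT A =====

-- `collides(old, new)`: loop over zip(old, new) with early `return False`.
def collidesPy : List String → List String → Bool
  | x :: xs, y :: ys =>
      if x ≠ y ∧ x ≠ "X" ∧ y ≠ "X" then false else collidesPy xs ys
  | _, _ => true

-- A's inner `for i in range(len(new))` loop collecting the toggled copies appended
-- to `cons`; `none` is exactly where Python raises IndexError on `old[i]`
-- (new[i] == 'X' with i ≥ len(old)); these inputs are excluded by Pre_ below.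
def expandA (old new : List String) : List Nat → Option (List (List String))
  | [] => some []
  | i :: is =>
      if new.getD i "" = "X" then
        match PySem.List.pyGet? old (i : Int) with
        | none => none
        | some o =>
            if o ≠ "X" then
              (expandA old new is).map
                (fun rest => (new.set i (if o = "1" then "0" else "1")) :: rest)
            else expandA old new is
      else expandA old new is

-- weight of a queue element for the termination measure of A's while-loop
def wRow (old new cur : List String) : Nat :=
  if collidesPy old cur then new.length + 2 else 1

def measureQ (old new : List String) (q : List (List String)) : Nat :=
  (q.map (wRow old new)).sum

-- (termination lemmas for loopA; cited in its decreasing_by)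
theorem collidesPy_false_of_conflict (old : List String) :
    ∀ (ys : List String) (i : Nat), ∀ (h1 : i < old.length) (h2 : i < ys.length),
      old[i] ≠ ys[i] → old[i] ≠ "X" → ys[i] ≠ "X" → collidesPy old ys = false := by
  induction old with
  | nil => intro ys i h1; simp at h1
  | cons x xs ih =>
    intro ys i h1 h2 hne hx hy
    cases ys with
    | nil => simp at h2
    | cons y ys' =>
      cases i with
      | zero =>
        simp at hne hx hy
        simp [collidesPy, hne, hx, hy]
      | succ n =>
        simp at hne hx hy
        unfold collidesPy
        split
        · rfl
        · exact ih ys' n (by simpa using h1) (by simpa using h2) hne hx hy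

theorem child_not_collides (old new : List String) (i : Nat) (o : String)
    (hi : i < new.length) (ho : PySem.List.pyGet? old (i : Int) = some o) (hoX : o ≠ "X") :
    collidesPy old (new.set i (if o = "1" then "0" else "1")) = false := by
  rw [PySem.List.pyGet?_natCast] at ho
  obtain ⟨hio, hoi⟩ := List.getElem?_eq_some_iff.mp ho
  set t : String := if o = "1" then "0" else "1" with ht
  have hlen : i < (new.set i t).length := by simpa using hi
  have hget : (new.set i t)[i] = t := List.getElem_set_self hlen
  have htno : t ≠ o := by
    by_cases h1 : o = "1"
    · subst h1; simp [ht]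
    · simp only [ht, if_neg h1]; exact fun hh => h1 hh.symm
  have htX : t ≠ "X" := by by_cases h1 : o = "1" <;> simp [ht, h1]
  have hconf : old[i] ≠ (new.set i t)[i] := by
    rw [hget, hoi]; exact fun hh => htno hh.symm
  have hx : old[i] ≠ "X" := by rw [hoi]; exact hoX
  have hy : (new.set i t)[i] ≠ "X" := by rw [hget]; exact htX
  exact collidesPy_false_of_conflict old (new.set i t) i hio hlen hconf hx hy


theorem expandA_children (old new : List String) :
    ∀ (is : List Nat) (cs : List (List String)),
      (∀ i ∈ is, i < new.length) → expandA old new is = some cs →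
      ∀ c ∈ cs, collidesPy old c = false := by
  intro is
  induction is with
  | nil => intro cs _ h; simp [expandA] at h; subst h; simp
  | cons i is ih =>
    intro cs hmem h
    unfold expandA at h
    split at h
    · split at h
      · exact absurd h (by simp)
      · rename_i o hpg
        split at h
        · rename_i hoX
          obtain ⟨rest, hrest, hcons⟩ := Option.map_eq_some_iff.mp h
          intro c hc
          rw [← hcons] at hc
          rcases List.mem_cons.mp hc with hcc | hcc
          · rw [hcc]
            exact child_not_collides old new i o (hmem i (by simp)) hpg hoX
          · exact ih rest (fun j hj => hmem j (by simp [hj])) hrest c hcc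
        · exact ih cs (fun j hj => hmem j (by simp [hj])) h
    · exact ih cs (fun j hj => hmem j (by simp [hj])) h

theorem expandA_length (old new : List String) :
    ∀ (is : List Nat) (cs : List (List String)),
      expandA old new is = some cs → cs.length ≤ is.length := by
  intro is
  induction is with
  | nil => intro cs h; simp [expandA] at h; subst h; simp
  | cons i is ih =>
    intro cs h
    unfold expandA at h
    split at h
    · split at h
      · exact absurd h (by simp)
      · split at h
        · obtain ⟨rest, hrest, hcons⟩ := Option.map_eq_some_iff.mp h
          rw [← hcons]
          simpa using Nat.succ_le_succ (ih rest hrest)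
        · exact le_trans (ih cs h) (by simp)
    · exact le_trans (ih cs h) (by simp)

theorem measureQ_of_noncollide (old new : List String) :
    ∀ (q : List (List String)), (∀ c ∈ q, collidesPy old c = false) →
      measureQ old new q = q.length := by
  intro q
  induction q with
  | nil => intro _; simp [measureQ]
  | cons c rest ih =>
    intro hq
    simp only [measureQ, List.map_cons, List.sum_cons, List.length_cons]
    rw [show wRow old new c = 1 from by unfold wRow; simp [hq c (by simp)]]
    have := ih (fun d hd => hq d (by simp [hd]))
    simp only [measureQ] at this
    omega

-- A's `while cons:` loop over the deque (good, cons are the two accumulators).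
def loopA (old new : List String) (good : List (List String)) :
    List (List String) → List (List String)
  | [] => good
  | cur :: rest =>
      if h : collidesPy old cur = false then
        loopA old new (good ++ [cur]) rest
      else
        match h2 : expandA old new (List.range new.length) with
        | none => good   -- Python raises IndexError here; excluded by Pre_
        | some cs => loopA old new good (rest ++ cs)
  termination_by q => measureQ old new q
  decreasing_by
  · have hw : 1 ≤ wRow old new cur := by unfold wRow; split <;> omega
    simp only [measureQ, List.map_cons, List.sum_cons]
    omega
  · have hcs : ∀ c ∈ cs, collidesPy old c = false :=
      expandA_children old new _ cs (by intro i hi; exact List.mem_range.mp hi) h2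
    have hlen : cs.length ≤ new.length := by
      simpa using expandA_length old new _ cs h2
    have hμ : measureQ old new cs = cs.length := measureQ_of_noncollide old new cs hcs
    have hct : collidesPy old cur = true := by simpa using h
    have hw : wRow old new cur = new.length + 2 := by
      unfold wRow; simp [hct]
    simp only [measureQ, List.map_cons, List.sum_cons, List.map_append, List.sum_append]
    have : (cs.map (wRow old new)).sum = cs.length := hμ
    omega

def narrow_hashe (old : List String) (new : List String) : List (List String) :=
  loopA old new [] [new]

-- ===== PORT B =====

-- B's comprehension: one pass over range(len(new)); `old[i]` out of range — where
-- B's Python raises IndexError (outside Pre_) — defaults to "X", i.e. skip.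
def emitB (old new : List String) : List Nat → List (List String)
  | [] => []
  | i :: is =>
      if new.getD i "" = "X" ∧ (PySem.List.pyGet? old (i : Int)).getD "X" ≠ "X" then
        (new.take i ++
          [if (PySem.List.pyGet? old (i : Int)).getD "X" = "1" then "0" else "1"] ++
          new.drop (i + 1)) :: emitB old new is
      else emitB old new is

def narrow_hashe_alt (old : List String) (new : List String) : List (List String) :=
  if (old.zip new).any (fun p => p.1 != p.2 && p.1 != "X" && p.2 != "X") then [new]
  else emitB old new (List.range new.length)

-- ===== PRECONDITION & SPEC =====

-- Pre_ excludes exactly the inputs where A raises IndexError: old and new collide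
-- (no hard conflict in their zipped region) while new has an 'X' at a position ≥ len(old).
-- B raises IndexError on the same inputs.
def Pre_narrow_hashe (old : List String) (new : List String) : Prop :=
  (∃ p ∈ old.zip new, p.1 ≠ p.2 ∧ p.1 ≠ "X" ∧ p.2 ≠ "X") ∨
  (∀ i < new.length, old.length ≤ i → new.getD i "" ≠ "X")
instance (old : List String) (new : List String) : Decidable (Pre_narrow_hashe old new) := by
  unfold Pre_narrow_hashe; infer_instance

def pvWitness_narrow_hashe : List String × List String := (["0", "1"], ["X", "X"])

def Spec_narrow_hashe (old : List String) (new : List String) (out : List (List String)) : Prop := out = narrow_hashe_alt old new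
instance (old : List String) (new : List String) (out : List (List String)) : Decidable (Spec_narrow_hashe old new out) := by unfold Spec_narrow_hashe; infer_instance

-- ===== CLAIM (what is proved, stated in full; the proofs are below) =====
def Claim_equal_narrow_hashe : Prop := ∀ (old : List String) (new : List String), Dom_narrow_hashe old new → Pre_narrow_hashe old new → Spec_narrow_hashe old new (narrow_hashe old new)

-- ===== LEMMAS AND PROOFS =====

-- collides(old, new) is the negation of B's any(conflict) over the zip.
theorem collidesPy_eq_not_any :
    ∀ (old new : List String),
      collidesPy old new
        = !((old.zip new).any (fun p => p.1 != p.2 && p.1 != "X" && p.2 != "X")) := by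
  intro old
  induction old with
  | nil => intro new; cases new <;> simp [collidesPy]
  | cons x xs ih =>
    intro new
    cases new with
    | nil => simp [collidesPy]
    | cons y ys =>
      unfold collidesPy
      split
      · rename_i hcond
        obtain ⟨h1, h2, h3⟩ := hcond
        simp [h1, h2, h3]
      · rename_i hcond
        simp only [List.zip_cons_cons, List.any_cons]
        rw [ih ys]
        have : (x != y && x != "X" && y != "X") = false := by
          by_cases e1 : x = y
          · simp [e1]
          · by_cases e2 : x = "X"
            · simp [e2]
            · by_cases e3 : y = "X"
              · simp [e3]
              · exact absurd ⟨e1, e2, e3⟩ hcond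
        simp [this]

-- flushing a queue of non-colliding rows just appends them to good
theorem loopA_flush (old new : List String) :
    ∀ (q good : List (List String)), (∀ c ∈ q, collidesPy old c = false) →
      loopA old new good q = good ++ q := by
  intro q
  induction q with
  | nil => intro good _; simp [loopA]
  | cons c rest ih =>
    intro good hq
    rw [loopA, dif_pos (hq c (by simp))]
    rw [ih (good ++ [c]) (fun d hd => hq d (by simp [hd]))]
    simp

-- when no index raises, expandA succeeds
theorem expandA_isSome (old new : List String) :
    ∀ (is : List Nat),
      (∀ i ∈ is, new.getD i "" = "X" → i < old.length) →
      (expandA old new is).isSome := by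
  intro is
  induction is with
  | nil => intro _; simp [expandA]
  | cons i is ih =>
    intro hmem
    unfold expandA
    split
    · rename_i hX
      split
      · rename_i hpg
        exfalso
        rw [PySem.List.pyGet?_natCast] at hpg
        have hge := List.getElem?_eq_none_iff.mp hpg
        have hlt := hmem i (by simp) hX
        omega
      · split
        · simpa using ih (fun j hj hXj => hmem j (by simp [hj]) hXj)
        · exact ih (fun j hj hXj => hmem j (by simp [hj]) hXj)
    · exact ih (fun j hj hXj => hmem j (by simp [hj]) hXj)

-- A's expansion produces exactly B's emitted list
theorem expandA_eq_emitB (old new : List String) :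
    ∀ (is : List Nat) (cs : List (List String)),
      (∀ i ∈ is, i < new.length) → expandA old new is = some cs →
      cs = emitB old new is := by
  intro is
  induction is with
  | nil => intro cs _ h; simp [expandA] at h; subst h; simp [emitB]
  | cons i is ih =>
    intro cs hmem h
    unfold expandA at h
    unfold emitB
    by_cases hX : new.getD i "" = "X"
    · rw [if_pos hX] at h
      split at h
      · exact absurd h (by simp)
      · rename_i o hpg
        by_cases hoX : o ≠ "X"
        · rw [if_pos hoX] at h
          obtain ⟨rest, hrest, hcons⟩ := Option.map_eq_some_iff.mp h
          rw [if_pos ⟨hX, by rw [hpg]; simpa using hoX⟩]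
          rw [← hcons, ih rest (fun j hj => hmem j (by simp [hj])) hrest]
          congr 1
          rw [hpg]
          simp only [Option.getD_some]
          rw [List.set_eq_take_cons_drop _ (hmem i (by simp))]
          simp
        · rw [if_neg hoX] at h
          have hoX2 : o = "X" := not_ne_iff.mp hoX
          rw [if_neg (fun hcond => hcond.2 (by rw [hpg, hoX2]; rfl))]
          exact ih cs (fun j hj => hmem j (by simp [hj])) h
    · rw [if_neg hX] at h
      rw [if_neg (fun hcond => hX hcond.1)]
      exact ih cs (fun j hj => hmem j (by simp [hj])) h

-- ===== VERDICT (by name: the statement is the Claim_ definition above) =====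
theorem narrow_hashe_spec : Claim_equal_narrow_hashe := by
  intro old new _ hpre
  unfold Spec_narrow_hashe narrow_hashe narrow_hashe_alt
  by_cases hc : collidesPy old new = false
  · have hany : ((old.zip new).any (fun p => p.1 != p.2 && p.1 != "X" && p.2 != "X")) = true := by
      have hh := collidesPy_eq_not_any old new
      rw [hc] at hh
      simpa using hh.symm
    rw [if_pos hany]
    have := loopA_flush old new [new] []
      (by intro c hcmem; simp at hcmem; subst hcmem; exact hc)
    simpa using this
  · have hct : collidesPy old new = true := by simpa using hc
    have hany : ((old.zip new).any (fun p => p.1 != p.2 && p.1 != "X" && p.2 != "X")) = false := by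
      have hh := collidesPy_eq_not_any old new
      rw [hct] at hh
      simpa using hh.symm
    rw [if_neg (by simp [hany])]
    have hpre2 : ∀ i < new.length, old.length ≤ i → new.getD i "" ≠ "X" := by
      rcases hpre with h1 | h2
      · exfalso
        obtain ⟨p, hp, c1, c2, c3⟩ := h1
        have : ((old.zip new).any (fun p => p.1 != p.2 && p.1 != "X" && p.2 != "X")) = true :=
          List.any_eq_true.mpr ⟨p, hp, by simp [c1, c2, c3]⟩
        rw [this] at hany
        exact absurd hany (by simp)
      · exact h2
    have hsome := expandA_isSome old new (List.range new.length) (by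
      intro i hi hXi
      by_contra hlt
      rw [not_lt] at hlt
      exact hpre2 i (List.mem_range.mp hi) hlt hXi)
    rw [loopA, dif_neg hc]
    split
    · rename_i heq
      rw [heq] at hsome
      exact absurd hsome (by simp)
    · rename_i cs heq
      have hkids := expandA_children old new (List.range new.length) cs
        (fun j hj => List.mem_range.mp hj) heq
      have hflush := loopA_flush old new ([] ++ cs) []
        (by intro c hcmem; simp at hcmem; exact hkids c hcmem)
      rw [hflush]
      simpa using expandA_eq_emitB old new (List.range new.length) cs
        (fun j hj => List.mem_range.mp hj) heq
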